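-- pv_equiv track=rewrite | github.com/andrewgazelka/rgb | tools/gen_packets.py | is_known_type
-- ===== SOURCE A (Python) =====
-- KNOWN_TYPES = {
--     'i8', 'i16', 'i32', 'i64',
--     'f32', 'f64', 'bool',
--     'String', 'Uuid', 'Position',
--     'Nbt', 'BlockState',
-- }
--
-- def is_known_type(t):
--     """Check if a type is fully known (can be derived)"""
--     if t in KNOWN_TYPES:
--         return True
--     if t.startswith('Vec<'):
--         inner = t[4:-1]
--         return is_known_type(inner)
--     if t.startswith('Option<'):
--         inner = t[7:-1]
--         return is_known_type(inner)
--     return False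
-- ===== SOURCE B (Python) =====
-- KNOWN_TYPES = {
--     'i8', 'i16', 'i32', 'i64',
--     'f32', 'f64', 'bool',
--     'String', 'Uuid', 'Position',
--     'Nbt', 'BlockState',
-- }
--
-- def is_known_type(t):
--     """Check if a type is fully known (can be derived)"""
--     # Two-pointer version: walk a (start, end) window over the original string
--     # instead of building slice copies; one membership test at the end.
--     i, j = 0, len(t)
--     while True:
--         if t.startswith('Vec<', i, j):
--             i, j = i + 4, j - 1
--         elif t.startswith('Option<', i, j):
--             i, j = i + 7, j - 1
--         else:
--             return t[i:j] in KNOWN_TYPES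
-- ===== Notes on version B (the rewrite author's own statement) =====
-- stated objective: alternative
-- what changed: Replaces A's recursion that materialises a new slice string at every step by a two-pointer while loop over (start, end) indices of the original string (prefix tests via startswith(p, i, j)), with a single membership test at the end.
import Mathlib
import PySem

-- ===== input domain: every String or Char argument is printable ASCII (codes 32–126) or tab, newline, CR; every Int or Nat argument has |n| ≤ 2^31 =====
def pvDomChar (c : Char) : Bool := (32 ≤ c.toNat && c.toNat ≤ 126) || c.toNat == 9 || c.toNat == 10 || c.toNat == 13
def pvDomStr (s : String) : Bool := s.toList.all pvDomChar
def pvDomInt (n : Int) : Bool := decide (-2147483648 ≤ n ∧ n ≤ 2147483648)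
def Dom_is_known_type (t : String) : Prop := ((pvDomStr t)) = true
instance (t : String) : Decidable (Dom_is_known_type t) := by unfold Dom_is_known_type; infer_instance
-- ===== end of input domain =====

-- B replaces A's slice-and-recurse by a two-pointer loop over (start, end) indices
-- of the original string, with one membership test at the end (objective: simpler).

-- ===== PORT A =====
-- the KNOWN_TYPES set (distinct string literals)
def pvKnownTypes : List (List Char) :=
  ["i8".toList, "i16".toList, "i32".toList, "i64".toList,
   "f32".toList, "f64".toList, "bool".toList,
   "String".toList, "Uuid".toList, "Position".toList,
   "Nbt".toList, "BlockState".toList]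

-- termination helper for the slices t[k:-1] under t.startswith(prefix), cited by decreasing_by
theorem pv_slice_len_lt (cs p : List Char) (k : Int)
    (hp : PySem.Chars.startswith cs p = true) (hk : 0 < k) (hkp : k ≤ (p.length : Int)) :
    (PySem.Chars.slice cs (some k) (some (-1))).length < cs.length := by
  have hle : p.length ≤ cs.length :=
    List.IsPrefix.length_le ((PySem.Chars.startswith_iff cs p).mp hp)
  have hne : cs ≠ [] := by
    intro h
    have h0 : cs.length = 0 := by simp [h]
    omega
  have hknn : ¬ (k < 0) := by omega
  simp [PySem.Chars.slice_eq_listSlice, PySem.List.length_slice, PySem.List.clampIdx, hne, hknn]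
  omega

def isKnownGo (cs : List Char) : Bool :=
  if pvKnownTypes.contains cs then true
  else if PySem.Chars.startswith cs "Vec<".toList then
    isKnownGo (PySem.Chars.slice cs (some 4) (some (-1)))
  else if PySem.Chars.startswith cs "Option<".toList then
    isKnownGo (PySem.Chars.slice cs (some 7) (some (-1)))
  else false
termination_by cs.length
decreasing_by
  · exact pv_slice_len_lt _ _ 4 (by assumption) (by omega) (by decide)
  · exact pv_slice_len_lt _ _ 7 (by assumption) (by omega) (by decide)

def is_known_type (t : String) : Bool := isKnownGo t.toList

-- ===== PORT B =====
-- t.startswith(p, i, j) in Python is exactly: t[i:j] begins with p (for 0 ≤ i, j);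
-- ported exactly as prefix-of-window ((cs.take j).drop i), the window t[i:j].
def pyStartswithAt (cs p : List Char) (i j : Nat) : Bool :=
  PySem.Chars.startswith ((cs.take j).drop i) p

-- the while loop: state is the index pair (i, j), the original string never changes
def altLoop (cs : List Char) (i j : Nat) : Bool :=
  if pyStartswithAt cs "Vec<".toList i j then altLoop cs (i + 4) (j - 1)
  else if pyStartswithAt cs "Option<".toList i j then altLoop cs (i + 7) (j - 1)
  else pvKnownTypes.contains ((cs.take j).drop i)
termination_by j - i
decreasing_by
  all_goals
    rename_i h
    have hle := List.IsPrefix.length_le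
      ((PySem.Chars.startswith_iff _ _).mp (by simpa [pyStartswithAt] using h))
    simp [List.length_drop, List.length_take] at hle
    omega

def is_known_type_alt (t : String) : Bool := altLoop t.toList 0 t.toList.length

-- ===== PRECONDITION & SPEC =====
def Spec_is_known_type (t : String) (out : Bool) : Prop := out = is_known_type_alt t
instance (t : String) (out : Bool) : Decidable (Spec_is_known_type t out) := by unfold Spec_is_known_type; infer_instance

-- ===== CLAIM (what is proved, stated in full; the proofs are below) =====
def Claim_equal_is_known_type : Prop := ∀ (t : String), Dom_is_known_type t → Spec_is_known_type t (is_known_type t)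

-- ===== LEMMAS AND PROOFS =====

-- no known type starts with 'Vec<' or 'Option<'
theorem pv_known_no_wrapper (cs : List Char) (h : cs ∈ pvKnownTypes) :
    PySem.Chars.startswith cs "Vec<".toList = false ∧
    PySem.Chars.startswith cs "Option<".toList = false := by
  simp only [pvKnownTypes, List.mem_cons, List.not_mem_nil, or_false] at h
  rcases h with h|h|h|h|h|h|h|h|h|h|h|h <;> subst h <;> exact ⟨by decide, by decide⟩

-- under t.startswith(p, i, j) (j in range, p nonempty) the prefix fits in the window
theorem pv_startswith_window_len (cs p : List Char) (i j : Nat) (hj : j ≤ cs.length)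
    (hp : p ≠ []) (h : pyStartswithAt cs p i j = true) : i + p.length ≤ j := by
  have hle := List.IsPrefix.length_le
    ((PySem.Chars.startswith_iff _ _).mp (by simpa [pyStartswithAt] using h))
  have hpl : 0 < p.length := List.length_pos_of_ne_nil hp
  simp only [List.length_drop, List.length_take] at hle
  omega

-- the slice sub[k:-1] of the window sub = t[i:j] is the window t[i+k : j-1]
theorem pv_slice_window (cs : List Char) (i j k : Nat) (hj : j ≤ cs.length)
    (hk : 0 < k) (hlen : i + k ≤ j) :
    PySem.List.slice ((cs.take j).drop i) (some (k : Int)) (some (-1))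
      = (cs.take (j - 1)).drop (i + k) := by
  have hL : ((cs.take j).drop i).length = j - i := by
    simp only [List.length_drop, List.length_take]
    omega
  simp only [PySem.List.slice, PySem.List.clampIdx, hL]
  have h1 : ¬ ((k : Int) < 0) := by omega
  have h3 : ¬ ((j - i : Nat) + (-1 : Int) < 0) := by omega
  simp only [if_neg h1, if_pos (by omega : ((-1:Int) < 0)), if_neg h3]
  have h4 : (k : Int).toNat = k := by omega
  have h5 : (((j - i : Nat) : Int) + (-1 : Int)).toNat = j - i - 1 := by omega
  rw [h4, h5, (by omega : min k (j - i) = k), List.drop_drop, List.drop_take, List.drop_take,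
    List.take_take]
  congr 1
  omega

-- a window that starts with a wrapper is not itself a known type
theorem pv_window_not_known (cs p : List Char) (i j : Nat)
    (h : pyStartswithAt cs p i j = true)
    (hw : ∀ xs ∈ pvKnownTypes, PySem.Chars.startswith xs p = false) :
    pvKnownTypes.contains ((cs.take j).drop i) = false := by
  by_contra hc
  have hmem : (cs.take j).drop i ∈ pvKnownTypes := by
    simpa using Bool.of_not_eq_false hc
  have hfalse := hw _ hmem
  have htrue : PySem.Chars.startswith ((cs.take j).drop i) p = true := h
  rw [hfalse] at htrue
  exact Bool.false_ne_true htrue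

-- loop/recursion correspondence: the B loop at window (i, j) computes A's recursion on t[i:j]
theorem pv_loop_eq_go (cs : List Char) (i j : Nat) (hj : j ≤ cs.length) :
    altLoop cs i j = isKnownGo ((cs.take j).drop i) := by
  induction i, j using altLoop.induct cs with
  | case1 i j h ih =>
    have h4 : i + 4 ≤ j := pv_startswith_window_len cs "Vec<".toList i j hj (by decide) h
    have hmem := pv_window_not_known cs "Vec<".toList i j h
      (fun xs hxs => (pv_known_no_wrapper xs hxs).1)
    have hs : PySem.Chars.startswith ((cs.take j).drop i) "Vec<".toList = true := h
    rw [altLoop, if_pos h, ih (by omega)]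
    conv_rhs => rw [isKnownGo]
    rw [if_neg (by rw [hmem]; exact Bool.false_ne_true), if_pos hs]
    congr 1
    rw [PySem.Chars.slice_eq_listSlice]
    exact_mod_cast (pv_slice_window cs i j 4 hj (by omega) h4).symm
  | case2 i j h1 h2 ih =>
    have h7 : i + 7 ≤ j := pv_startswith_window_len cs "Option<".toList i j hj (by decide) h2
    have hmem := pv_window_not_known cs "Option<".toList i j h2
      (fun xs hxs => (pv_known_no_wrapper xs hxs).2)
    have hs1 : ¬ PySem.Chars.startswith ((cs.take j).drop i) "Vec<".toList = true := h1
    have hs2 : PySem.Chars.startswith ((cs.take j).drop i) "Option<".toList = true := h2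
    rw [altLoop, if_neg h1, if_pos h2, ih (by omega)]
    conv_rhs => rw [isKnownGo]
    rw [if_neg (by rw [hmem]; exact Bool.false_ne_true), if_neg hs1, if_pos hs2]
    congr 1
    rw [PySem.Chars.slice_eq_listSlice]
    exact_mod_cast (pv_slice_window cs i j 7 hj (by omega) h7).symm
  | case3 i j h1 h2 =>
    have hs1 : ¬ PySem.Chars.startswith ((cs.take j).drop i) "Vec<".toList = true := h1
    have hs2 : ¬ PySem.Chars.startswith ((cs.take j).drop i) "Option<".toList = true := h2
    rw [altLoop, if_neg h1, if_neg h2]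
    conv_rhs => rw [isKnownGo]
    by_cases hmem : pvKnownTypes.contains ((cs.take j).drop i) = true
    · rw [if_pos hmem, hmem]
    · rw [if_neg hmem, if_neg hs1, if_neg hs2]
      exact Bool.eq_false_iff.mpr hmem

-- ===== VERDICT (by name: the statement is the Claim_ definition above) =====
theorem is_known_type_spec : Claim_equal_is_known_type := by
  intro t _
  unfold Spec_is_known_type is_known_type is_known_type_alt
  rw [pv_loop_eq_go t.toList 0 t.toList.length le_rfl]
  simp only [List.drop_zero, List.take_length]
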